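-- pv_equiv track=rewrite | github.com/zhuran24/-70x70-3-2.75- | src/models/port_binding.py | _enumerate_side_binding_patterns
-- ===== SOURCE A (Python) =====
-- from itertools import combinations, product
-- from typing import Any, Dict, Iterable, List, Mapping, Sequence, Tuple
--
-- SideBindingPattern = Tuple[Tuple[int, str], ...]
--
-- def _enumerate_side_binding_patterns(
--     ordered_cell_count: int,
--     slot_counts: Mapping[str, int],
--     port_type: str,
-- ) -> List[SideBindingPattern]:
--     required = [(commodity, count) for commodity, count in slot_counts.items() if count > 0]
--     total_slots = sum(count for _, count in required)
--     if total_slots > ordered_cell_count: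
--         raise ValueError(
--             f"{port_type} ports are insufficient: need {total_slots}, have {ordered_cell_count}"
--         )
--     if not required:
--         return [tuple()]
--
--     results: List[SideBindingPattern] = []
--
--     def backtrack(
--         req_idx: int,
--         remaining_indices: Sequence[int],
--         chosen: Dict[int, str],
--     ) -> None:
--         if req_idx >= len(required):
--             results.append(
--                 tuple((idx, str(chosen[idx])) for idx in sorted(chosen))
--             )
--             return
--
--         commodity, count = required[req_idx]
--         for combo in combinations(remaining_indices, count):
--             next_chosen = dict(chosen)
--             for idx in combo:
--                 next_chosen[idx] = commodity
--             next_remaining = [idx for idx in remaining_indices if idx not in combo]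
--             backtrack(req_idx + 1, next_remaining, next_chosen)
--
--     backtrack(0, list(range(ordered_cell_count)), {})
--     return results
-- ===== SOURCE B (Python) =====
-- from itertools import combinations
--
--
-- def _enumerate_side_binding_patterns(ordered_cell_count, slot_counts, port_type):
--     required = [(commodity, count) for commodity, count in slot_counts.items() if count > 0]
--     total_slots = sum(count for _, count in required)
--     if total_slots > ordered_cell_count:
--         raise ValueError(
--             f"{port_type} ports are insufficient: need {total_slots}, have {ordered_cell_count}"
--         )
--     if not required:
--         return [tuple()]
--
--     # iterative worklist: each partial state is (remaining_indices, chosen)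
--     states = [(list(range(ordered_cell_count)), {})]
--     for commodity, count in required:
--         next_states = []
--         for remaining, chosen in states:
--             for combo in combinations(remaining, count):
--                 new_chosen = dict(chosen)
--                 for idx in combo:
--                     new_chosen[idx] = commodity
--                 next_states.append(
--                     ([idx for idx in remaining if idx not in combo], new_chosen)
--                 )
--         states = next_states
--     return [
--         tuple((idx, str(chosen[idx])) for idx in sorted(chosen))
--         for _, chosen in states
--     ]
-- ===== Notes on version B (the rewrite author's own statement) =====
-- stated objective: alternative
-- what changed: The recursive backtracking DFS with a mutated results list is replaced by an iterative breadth-wise worklist of partial states (remaining indices, chosen dict) expanded once per commodity and formatted at the end; worklist order reproduces the DFS output order exactly.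
import Mathlib
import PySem

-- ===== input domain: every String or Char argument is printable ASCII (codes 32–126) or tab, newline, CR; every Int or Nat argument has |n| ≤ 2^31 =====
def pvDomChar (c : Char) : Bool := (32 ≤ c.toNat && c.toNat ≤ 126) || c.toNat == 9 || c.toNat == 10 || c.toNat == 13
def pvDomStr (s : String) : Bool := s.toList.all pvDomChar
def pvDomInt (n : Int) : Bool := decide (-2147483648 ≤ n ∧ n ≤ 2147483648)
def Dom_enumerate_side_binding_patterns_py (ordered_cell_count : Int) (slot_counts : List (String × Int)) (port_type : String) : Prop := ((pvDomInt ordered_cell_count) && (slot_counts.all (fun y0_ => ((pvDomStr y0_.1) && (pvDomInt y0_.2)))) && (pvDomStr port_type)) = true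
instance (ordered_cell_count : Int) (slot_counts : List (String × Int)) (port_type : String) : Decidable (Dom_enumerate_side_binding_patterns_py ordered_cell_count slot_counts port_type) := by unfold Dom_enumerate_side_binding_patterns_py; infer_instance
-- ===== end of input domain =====

-- B replaces A's recursive backtracking DFS by an iterative level-by-level worklist of
-- partial states (an 'alternative' decomposition, same cost); the return values agree on
-- every input on which A returns (Pre_ excludes exactly A's ValueError inputs).

-- ===== PORT A =====

-- itertools.combinations(xs, r) in itertools' order (shared: both Pythons call the library)
def pyCombinations : List Int → Nat → List (List Int)
  | _, 0 => [[]]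
  | [], _ + 1 => []
  | x :: rest, n + 1 =>
      (pyCombinations rest n).map (fun c => x :: c) ++ pyCombinations rest (n + 1)

-- tuple((idx, str(chosen[idx])) for idx in sorted(chosen))  (shared formatting expression)
def pvFmt (chosen : PySem.Dict Int String) : List (Int × String) :=
  (PySem.List.sorted chosen.keys (fun x => x) false).map (fun idx => (idx, chosen.getD idx ""))

-- A's inner 'backtrack', recursing on the suffix of `required`, threading the mutated
-- `results` list as an accumulator
def pvBacktrack : List (String × Int) → List Int → PySem.Dict Int String →
    List (List (Int × String)) → List (List (Int × String))
  | [], _, chosen, results => results ++ [pvFmt chosen]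
  | (commodity, count) :: rest, remaining, chosen, results =>
      (pyCombinations remaining count.toNat).foldl
        (fun res combo =>
          pvBacktrack rest (remaining.filter (fun idx => !combo.contains idx))
            (combo.foldl (fun d idx => d.insert idx commodity) chosen) res)
        results

def enumerate_side_binding_patterns_py (ordered_cell_count : Int) (slot_counts : List (String × Int)) (port_type : String) : List (List (Int × String)) :=
  let required := (PySem.Dict.ofList slot_counts).items.filter (fun p => p.2 > 0)
  let total_slots := (required.map (fun p => p.2)).sum
  if total_slots > ordered_cell_count then []  -- ValueError in Python; excluded by Pre_
  else if required.isEmpty then [[]]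
  else pvBacktrack required (PySem.List.pyRange 0 ordered_cell_count 1) PySem.Dict.empty []

-- ===== PORT B =====

def enumerate_side_binding_patterns_py_alt (ordered_cell_count : Int) (slot_counts : List (String × Int)) (port_type : String) : List (List (Int × String)) :=
  let required := (PySem.Dict.ofList slot_counts).items.filter (fun p => p.2 > 0)
  let total_slots := (required.map (fun p => p.2)).sum
  if total_slots > ordered_cell_count then []  -- ValueError in Python; excluded by Pre_
  else if required.isEmpty then [[]]
  else
    (required.foldl
      (fun states pc =>
        states.flatMap (fun st =>
          (pyCombinations st.1 pc.2.toNat).map (fun combo =>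
            (st.1.filter (fun idx => !combo.contains idx),
             combo.foldl (fun d idx => d.insert idx pc.1) st.2))))
      [(PySem.List.pyRange 0 ordered_cell_count 1, PySem.Dict.empty)]).map
      (fun st => pvFmt st.2)

-- ===== PRECONDITION & SPEC =====
-- Pre_ excludes exactly the inputs where A raises ValueError: the total of the positive
-- slot counts exceeds ordered_cell_count.
def Pre_enumerate_side_binding_patterns_py (ordered_cell_count : Int) (slot_counts : List (String × Int)) (port_type : String) : Prop :=
  ((((PySem.Dict.ofList slot_counts).items.filter (fun p => p.2 > 0)).map (fun p => p.2)).sum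
    ≤ ordered_cell_count)
instance (ordered_cell_count : Int) (slot_counts : List (String × Int)) (port_type : String) : Decidable (Pre_enumerate_side_binding_patterns_py ordered_cell_count slot_counts port_type) := by unfold Pre_enumerate_side_binding_patterns_py; infer_instance

def pvWitness_enumerate_side_binding_patterns_py : Int × (List (String × Int)) × String :=
  (3, [("wood", 1), ("ore", 2)], "input")

def Spec_enumerate_side_binding_patterns_py (ordered_cell_count : Int) (slot_counts : List (String × Int)) (port_type : String) (out : List (List (Int × String))) : Prop := out = enumerate_side_binding_patterns_py_alt ordered_cell_count slot_counts port_type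
instance (ordered_cell_count : Int) (slot_counts : List (String × Int)) (port_type : String) (out : List (List (Int × String))) : Decidable (Spec_enumerate_side_binding_patterns_py ordered_cell_count slot_counts port_type out) := by unfold Spec_enumerate_side_binding_patterns_py; infer_instance

-- ===== CLAIM (what is proved, stated in full; the proofs are below) =====
def Claim_equal_enumerate_side_binding_patterns_py : Prop := ∀ (ordered_cell_count : Int) (slot_counts : List (String × Int)) (port_type : String), Dom_enumerate_side_binding_patterns_py ordered_cell_count slot_counts port_type → Pre_enumerate_side_binding_patterns_py ordered_cell_count slot_counts port_type → Spec_enumerate_side_binding_patterns_py ordered_cell_count slot_counts port_type (enumerate_side_binding_patterns_py ordered_cell_count slot_counts port_type)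

-- ===== LEMMAS AND PROOFS =====

-- purely functional reading of A's backtrack (proof device linking the two ports)
def pvBkPure : List (String × Int) → List Int → PySem.Dict Int String →
    List (List (Int × String))
  | [], _, chosen => [pvFmt chosen]
  | (commodity, count) :: rest, remaining, chosen =>
      (pyCombinations remaining count.toNat).flatMap (fun combo =>
        pvBkPure rest (remaining.filter (fun idx => !combo.contains idx))
          (combo.foldl (fun d idx => d.insert idx commodity) chosen))

lemma pvBacktrack_eq_pure :
    ∀ (req : List (String × Int)) (rem : List Int) (ch : PySem.Dict Int String)
      (res : List (List (Int × String))),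
      pvBacktrack req rem ch res = res ++ pvBkPure req rem ch := by
  intro req
  induction req with
  | nil => intro rem ch res; simp [pvBacktrack, pvBkPure]
  | cons pc rest ih =>
      intro rem ch res
      obtain ⟨c, n⟩ := pc
      show (pyCombinations rem n.toNat).foldl _ res = _
      simp only [pvBkPure]
      induction (pyCombinations rem n.toNat) generalizing res with
      | nil => simp
      | cons cb cbs ihc =>
          simp only [List.foldl_cons, List.flatMap_cons]
          rw [ihc, ih, List.append_assoc]

lemma pvFold_eq_pure :
    ∀ (req : List (String × Int)) (states : List (List Int × PySem.Dict Int String)),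
      (req.foldl
        (fun states pc =>
          states.flatMap (fun st =>
            (pyCombinations st.1 pc.2.toNat).map (fun combo =>
              (st.1.filter (fun idx => !combo.contains idx),
               combo.foldl (fun d idx => d.insert idx pc.1) st.2)))) states).map
        (fun st => pvFmt st.2)
      = states.flatMap (fun st => pvBkPure req st.1 st.2) := by
  intro req
  induction req with
  | nil =>
      intro states
      simp only [List.foldl_nil, pvBkPure, ← List.map_eq_flatMap]
  | cons pc rest ih =>
      intro states
      obtain ⟨c, n⟩ := pc
      rw [List.foldl_cons, ih]
      simp only [List.flatMap_assoc, pvBkPure, List.flatMap_map]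

-- ===== VERDICT (by name: the statement is the Claim_ definition above) =====
theorem enumerate_side_binding_patterns_py_spec : Claim_equal_enumerate_side_binding_patterns_py := by
  intro occ sc pt _hDom hPre
  unfold Spec_enumerate_side_binding_patterns_py
  unfold enumerate_side_binding_patterns_py enumerate_side_binding_patterns_py_alt
  unfold Pre_enumerate_side_binding_patterns_py at hPre
  dsimp only
  rw [if_neg (not_lt.mpr hPre), if_neg (not_lt.mpr hPre)]
  by_cases h : ((PySem.Dict.ofList sc).items.filter (fun p => p.2 > 0)).isEmpty
  · rw [if_pos h, if_pos h]
  · rw [if_neg h, if_neg h]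
    rw [pvFold_eq_pure]
    rw [pvBacktrack_eq_pure]
    simp
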